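-- pv_equiv track=rewrite | github.com/pvparser/PVParser-release | src/period_identification/a4_frequent_pattern_identifier.py | match_pattern_sequence
-- ===== SOURCE A (Python) =====
-- from typing import Dict, List, Tuple, Optional, Any
--
-- def match_pattern_sequence(pattern_seq: List[str], sequence: List[str]) -> Tuple[int, int]:
--     """
--     Match a pattern sequence in the entire sequence and calculate match rate.
--
--     Args:
--         pattern_seq: Pattern sequence to match (e.g., ["S-144-0x0070:0xCC", "C-116-0x0070:0x4C"])
--         sequence: Entire sequence to search in
--
--     Returns:
--         Tuple of (match_count, total_possible_matches)
--     """
--     if not pattern_seq or not sequence or len(pattern_seq) > len(sequence):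
--         return 0, 0
--
--     pattern_len = len(pattern_seq)
--     sequence_len = len(sequence)
--     match_count = 0
--     total_possible = 0
--
--     i = 0
--     while i <= sequence_len - pattern_len:
--         # Try to match pattern at position i
--         match = True
--         for j in range(pattern_len):
--             if sequence[i + j] != pattern_seq[j]:
--                 match = False
--                 break
--
--         if match:
--             match_count += 1
--             i += pattern_len  # Skip matched pattern, continue after it
--         else:
--             i += 1
--
--         total_possible += 1
--
--     return match_count, total_possible
-- ===== SOURCE B (Python) =====
-- def match_pattern_sequence(pattern_seq, sequence):
--     if not pattern_seq or not sequence or len(pattern_seq) > len(sequence):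
--         return 0, 0
--     m = len(pattern_seq)
--     limit = len(sequence) - m
--     # dynamic programming, back to front: dp[i] = (matches, steps) that the
--     # greedy process yields when started at position i; answer is dp[0].
--     dp = [(0, 0)] * (limit + m + 1)
--     for j in range(limit + 1):
--         i = limit - j
--         if sequence[i:i + m] == pattern_seq:
--             nxt = dp[i + m]
--             dp[i] = (nxt[0] + 1, nxt[1] + 1)
--         else:
--             nxt = dp[i + 1]
--             dp[i] = (nxt[0], nxt[1] + 1)
--     return dp[0]
-- ===== Notes on version B (the rewrite author's own statement) =====
-- stated objective: alternative
-- what changed: B replaces A's forward greedy while-loop simulation by a right-to-left dynamic program: dp[i] is the (matches, steps) result of starting at position i, computed for every position from the recurrence dp[i] = dp[i+m]+(1,1) on a match else dp[i+1]+(0,1), and the answer is dp[0].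
import Mathlib
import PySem

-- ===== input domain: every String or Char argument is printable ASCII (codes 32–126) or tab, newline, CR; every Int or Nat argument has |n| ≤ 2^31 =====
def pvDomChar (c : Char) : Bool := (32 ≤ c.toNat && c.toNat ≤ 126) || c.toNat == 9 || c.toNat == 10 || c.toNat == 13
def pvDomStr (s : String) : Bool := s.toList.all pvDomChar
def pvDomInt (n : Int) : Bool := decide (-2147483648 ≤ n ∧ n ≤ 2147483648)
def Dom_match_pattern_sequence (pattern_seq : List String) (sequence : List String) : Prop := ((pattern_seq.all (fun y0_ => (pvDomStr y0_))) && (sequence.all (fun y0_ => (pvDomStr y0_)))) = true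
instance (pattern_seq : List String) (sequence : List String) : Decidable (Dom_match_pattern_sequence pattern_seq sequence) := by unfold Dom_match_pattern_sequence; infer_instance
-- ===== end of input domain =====

-- B replaces A's forward greedy while-loop by a right-to-left dynamic program over all start
-- positions (dp[i] = result of starting the process at i; answer dp[0]); objective: alternative.

-- ===== PORT A =====
-- inner 'for j in range(pattern_len): if sequence[i+j] != pattern_seq[j]: break' loop
-- (indices are always in range when i ≤ len(sequence) - len(pattern_seq); .all has Python's early exit)
def pvAMatchAt (pat seq : List String) (i : Nat) : Bool :=
  (List.range pat.length).all (fun j => seq.getD (i + j) "" == pat.getD j "")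

-- the 'while i <= sequence_len - pattern_len' loop; fuel = limit+1 only guarantees termination
-- (i strictly increases each iteration, so fuel never cuts the loop short)
def pvALoop (pat seq : List String) (limit : Nat) : Nat → Nat → Nat → Nat → Nat × Nat
  | 0, _, mc, tp => (mc, tp)
  | fuel + 1, i, mc, tp =>
    if i ≤ limit then
      if pvAMatchAt pat seq i then
        pvALoop pat seq limit fuel (i + pat.length) (mc + 1) (tp + 1)
      else
        pvALoop pat seq limit fuel (i + 1) mc (tp + 1)
    else (mc, tp)

def match_pattern_sequence (pattern_seq : List String) (sequence : List String) : List Int :=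
  if pattern_seq = [] ∨ sequence = [] ∨ sequence.length < pattern_seq.length then [0, 0]
  else
    let limit := sequence.length - pattern_seq.length
    let r := pvALoop pattern_seq sequence limit (limit + 1) 0 0 0
    [(r.1 : Int), (r.2 : Int)]

-- ===== PORT B =====
-- 'sequence[i:i+m] == pattern_seq'
def pvBMatch (pat seq : List String) (i : Nat) : Bool :=
  ((seq.drop i).take pat.length) == pat

-- one iteration of B's 'for j in range(limit+1)' loop body (i = limit - j)
def pvBStep (pat seq : List String) (dp : List (Nat × Nat)) (i : Nat) : List (Nat × Nat) :=
  if pvBMatch pat seq i then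
    let nxt := dp.getD (i + pat.length) (0, 0)
    dp.set i (nxt.1 + 1, nxt.2 + 1)
  else
    let nxt := dp.getD (i + 1) (0, 0)
    dp.set i (nxt.1, nxt.2 + 1)

def match_pattern_sequence_alt (pattern_seq : List String) (sequence : List String) : List Int :=
  if pattern_seq = [] ∨ sequence = [] ∨ sequence.length < pattern_seq.length then [0, 0]
  else
    let m := pattern_seq.length
    let limit := sequence.length - m
    let dp0 : List (Nat × Nat) := List.replicate (limit + m + 1) (0, 0)
    let dp := (List.range (limit + 1)).foldl
      (fun dp j => pvBStep pattern_seq sequence dp (limit - j)) dp0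
    let r := dp.getD 0 (0, 0)
    [(r.1 : Int), (r.2 : Int)]

-- ===== PRECONDITION & SPEC =====
def Spec_match_pattern_sequence (pattern_seq : List String) (sequence : List String) (out : List Int) : Prop := out = match_pattern_sequence_alt pattern_seq sequence
instance (pattern_seq : List String) (sequence : List String) (out : List Int) : Decidable (Spec_match_pattern_sequence pattern_seq sequence out) := by unfold Spec_match_pattern_sequence; infer_instance

-- ===== CLAIM (what is proved, stated in full; the proofs are below) =====
def Claim_equal_match_pattern_sequence : Prop := ∀ (pattern_seq : List String) (sequence : List String), Dom_match_pattern_sequence pattern_seq sequence → Spec_match_pattern_sequence pattern_seq sequence (match_pattern_sequence pattern_seq sequence)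

-- ===== LEMMAS AND PROOFS =====

-- B's slice comparison equals A's element-by-element match test, at in-range positions
lemma pvMatch_eq (pat seq : List String) (limit i : Nat)
    (hlim : limit + pat.length ≤ seq.length) (hi : i ≤ limit) :
    pvBMatch pat seq i = pvAMatchAt pat seq i := by
  rw [pvBMatch, Bool.eq_iff_iff]
  have hlen : ((seq.drop i).take pat.length).length = pat.length := by
    simp; omega
  simp only [pvAMatchAt, List.all_eq_true, List.mem_range, beq_iff_eq]
  constructor
  · intro h j hj
    have := congrArg (fun l => l.getD j "") h
    simpa [List.getD_eq_getElem?_getD, List.getElem?_take, List.getElem?_drop, hj,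
      List.getElem?_eq_getElem (by omega : i + j < seq.length),
      List.getElem?_eq_getElem (by omega : j < pat.length),
      Nat.add_comm i j] using this
  · intro h
    apply List.ext_getElem hlen
    intro j hj1 hj2
    have := h j (by omega)
    simp only [List.getD_eq_getElem?_getD, List.getElem?_eq_getElem (by omega : i + j < seq.length),
      List.getElem?_eq_getElem hj2, Option.getD_some] at this
    simpa [List.getElem_take, List.getElem_drop, Nat.add_comm i j] using this

-- the value of the greedy process started at position i (fuel-indexed)
def pvD (pat seq : List String) (limit : Nat) : Nat → Nat → Nat × Nat
  | 0, _ => (0, 0)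
  | f + 1, i =>
    if i ≤ limit then
      if pvAMatchAt pat seq i then
        ((pvD pat seq limit f (i + pat.length)).1 + 1, (pvD pat seq limit f (i + pat.length)).2 + 1)
      else
        ((pvD pat seq limit f (i + 1)).1, (pvD pat seq limit f (i + 1)).2 + 1)
    else (0, 0)

-- pvD is fuel-insensitive once the fuel reaches the end of the loop
lemma pvD_fuel (pat seq : List String) (limit : Nat) (hm : pat ≠ []) :
    ∀ (f1 f2 i : Nat), limit + 1 ≤ i + f1 → limit + 1 ≤ i + f2 →
      pvD pat seq limit f1 i = pvD pat seq limit f2 i := by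
  have hm1 : 1 ≤ pat.length := List.length_pos_iff.mpr hm
  intro f1
  induction f1 with
  | zero =>
    intro f2 i h1 h2
    have : ¬ i ≤ limit := by omega
    cases f2 with
    | zero => rfl
    | succ f => simp [pvD, this]
  | succ f ih =>
    intro f2 i h1 h2
    cases f2 with
    | zero =>
      have : ¬ i ≤ limit := by omega
      simp [pvD, this]
    | succ g =>
      by_cases hi : i ≤ limit
      · rw [pvD, pvD, if_pos hi, if_pos hi]
        by_cases hmt : pvAMatchAt pat seq i
        · rw [if_pos hmt, if_pos hmt, ih g (i + pat.length) (by omega) (by omega)]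
        · rw [if_neg hmt, if_neg hmt, ih g (i + 1) (by omega) (by omega)]
      · rw [pvD, pvD, if_neg hi, if_neg hi]

-- A's loop accumulates exactly pvD
lemma pvALoop_eq_pvD (pat seq : List String) (limit : Nat) (hm : pat ≠ []) :
    ∀ (f i mc tp : Nat), limit + 1 ≤ i + f →
      pvALoop pat seq limit f i mc tp
        = (mc + (pvD pat seq limit f i).1, tp + (pvD pat seq limit f i).2) := by
  have hm1 : 1 ≤ pat.length := List.length_pos_iff.mpr hm
  intro f
  induction f with
  | zero =>
    intro i mc tp h
    simp [pvALoop, pvD]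
  | succ f ih =>
    intro i mc tp h
    by_cases hi : i ≤ limit
    · rw [pvALoop, pvD, if_pos hi, if_pos hi]
      by_cases hmt : pvAMatchAt pat seq i
      · rw [if_pos hmt, if_pos hmt, ih (i + pat.length) (mc + 1) (tp + 1) (by omega)]
        simp; omega
      · rw [if_neg hmt, if_neg hmt, ih (i + 1) mc (tp + 1) (by omega)]
        simp; omega
    · rw [pvALoop, pvD, if_neg hi, if_neg hi]; simp
  
-- canonical-fuel value
def pvDc (pat seq : List String) (limit i : Nat) : Nat × Nat :=
  pvD pat seq limit (limit + 1) i

-- the recurrence for pvDc at an in-range position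
lemma pvDc_rec (pat seq : List String) (limit i : Nat) (hm : pat ≠ []) (hi : i ≤ limit) :
    pvDc pat seq limit i =
      (if pvAMatchAt pat seq i then
        ((pvDc pat seq limit (i + pat.length)).1 + 1, (pvDc pat seq limit (i + pat.length)).2 + 1)
      else
        ((pvDc pat seq limit (i + 1)).1, (pvDc pat seq limit (i + 1)).2 + 1)) := by
  have hm1 : 1 ≤ pat.length := List.length_pos_iff.mpr hm
  rw [pvDc, pvD, if_pos hi,
    pvD_fuel pat seq limit hm limit (limit + 1) (i + pat.length) (by omega) (by omega),
    pvD_fuel pat seq limit hm limit (limit + 1) (i + 1) (by omega) (by omega)]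
  rfl

-- pvDc is (0,0) past the end of the loop
lemma pvDc_out (pat seq : List String) (limit i : Nat) (hi : limit < i) :
    pvDc pat seq limit i = (0, 0) := by
  rw [pvDc, pvD, if_neg (by omega)]

-- invariant of B's fold: after processing j positions (limit down to limit+1-j), the table
-- holds pvDc at every index ≥ limit+1-j and (0,0) below, with its length unchanged
lemma pvBFold_inv (pat seq : List String) (limit : Nat) (hm : pat ≠ [])
    (hlim : limit + pat.length ≤ seq.length) :
    ∀ (j : Nat), j ≤ limit + 1 →
      (let dp := (List.range j).foldl
          (fun dp j => pvBStep pat seq dp (limit - j))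
          (List.replicate (limit + pat.length + 1) ((0 : Nat), (0 : Nat)));
        dp.length = limit + pat.length + 1 ∧
        ∀ idx : Nat,
          (limit + 1 ≤ idx + j → dp.getD idx (0, 0) = pvDc pat seq limit idx) ∧
          (idx + j < limit + 1 → dp.getD idx (0, 0) = (0, 0))) := by
  have hm1 : 1 ≤ pat.length := List.length_pos_iff.mpr hm
  intro j
  induction j with
  | zero =>
    intro _
    have hrep : ∀ idx : Nat,
        (List.replicate (limit + pat.length + 1) ((0 : Nat), (0 : Nat))).getD idx (0, 0) = (0, 0) := by
      intro idx
      rw [List.getD_eq_getElem?_getD, List.getElem?_replicate]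
      split <;> rfl
    refine ⟨by simp, fun idx => ⟨fun h => ?_, fun h => ?_⟩⟩
    · simp only [List.range_zero, List.foldl_nil]
      rw [hrep idx, pvDc_out pat seq limit idx (by omega)]
    · simp only [List.range_zero, List.foldl_nil]
      exact hrep idx
  | succ j ih =>
    intro hj
    obtain ⟨hlen, hinv⟩ := ih (by omega)
    rw [List.range_succ, List.foldl_append, List.foldl_cons, List.foldl_nil]
    set dp := (List.range j).foldl
        (fun dp j => pvBStep pat seq dp (limit - j))
        (List.replicate (limit + pat.length + 1) ((0 : Nat), (0 : Nat))) with hdp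
    -- the position written this iteration
    have hij : limit - j + j = limit := by omega
    set i := limit - j with hi
    have hiK : i ≤ limit := by omega
    have hilt : i < dp.length := by omega
    -- the dp value read this iteration is pvDc at the successor position
    have hread : ∀ k, i < k → dp.getD k (0, 0) = pvDc pat seq limit k := by
      intro k hk
      exact (hinv k).1 (by omega)
    have hmatch := pvMatch_eq pat seq limit i hlim hiK
    have hnew : pvBStep pat seq dp i = dp.set i (pvDc pat seq limit i) := by
      rw [pvBStep, hmatch, pvDc_rec pat seq limit i hm hiK]
      by_cases hmt : pvAMatchAt pat seq i
      · rw [if_pos hmt, if_pos hmt, hread (i + pat.length) (by omega)]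
      · rw [if_neg hmt, if_neg hmt, hread (i + 1) (by omega)]
    rw [hnew]
    refine ⟨by simpa using hlen, fun idx => ⟨fun h => ?_, fun h => ?_⟩⟩
    · by_cases hidx : idx = i
      · subst hidx
        simp [List.getD_eq_getElem?_getD, List.getElem?_set_self hilt]
      · have : idx + j ≥ limit + 1 ∨ idx + j < limit + 1 := by omega
        rcases this with h' | h'
        · rw [List.getD_eq_getElem?_getD, List.getElem?_set_ne (by omega),
            ← List.getD_eq_getElem?_getD]
          exact (hinv idx).1 h'
        · -- idx + j < limit + 1 ≤ idx + j + 1 forces idx = i, contradiction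
          omega
    · rw [List.getD_eq_getElem?_getD, List.getElem?_set_ne (by omega), ← List.getD_eq_getElem?_getD]
      exact (hinv idx).2 (by omega)

-- ===== VERDICT (by name: the statement is the Claim_ definition above) =====
theorem match_pattern_sequence_spec : Claim_equal_match_pattern_sequence := by
  intro pat seq _
  unfold Spec_match_pattern_sequence match_pattern_sequence match_pattern_sequence_alt
  by_cases hg : pat = [] ∨ seq = [] ∨ seq.length < pat.length
  · simp [hg]
  · rw [if_neg hg, if_neg hg]
    have hm : pat ≠ [] := fun h => hg (Or.inl h)
    have hle : ¬ seq.length < pat.length := fun h => hg (Or.inr (Or.inr h))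
    set limit := seq.length - pat.length with hK
    have hlim : limit + pat.length ≤ seq.length := by omega
    obtain ⟨_, hinv⟩ := pvBFold_inv pat seq limit hm hlim (limit + 1) (by omega)
    have hB := (hinv 0).1 (by omega)
    have hA := pvALoop_eq_pvD pat seq limit hm (limit + 1) 0 0 0 (by omega)
    simp only []
    rw [hA, hB, pvDc]
    simp
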